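-- pv_equiv track=rewrite | github.com/Hansung-include/Coding-Test-Study | 14주차/크레인 인형뽑기 게임/이준형_크레인인형뽑기게임.py | solution
-- ===== SOURCE A (Python) =====
-- def solution(board, moves):
--     answer = 0
--     doll_idx = [0 for _ in range(len(board[0]))]  # 1, 2, 3, 4,, 번에 있는 가장 높게 위치한 인형의 index 를 저장
--     for i in range(len(board[0])):  # 1, 2, 3, 4번  for 문
--         for j in range(len(board)):  # height for 문
--             if board[j][i]:
--                 doll_idx[i] = j
--                 break
--
--     basket = []  # 바구니
--     for m in moves:  # 하나씩 인형을 뽑으면서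
--         idx = m - 1  # idx 조정
--         doll = board[doll_idx[idx]][idx]  # 인형의 고유 번호
--         board[doll_idx[idx]][idx] = 0  # 뽑았으니 없다고 표시
--         if doll_idx[idx]+1 < len(board):  # 인형을 뽑았으니 한칸 아래인 idx 로 저장
--             doll_idx[idx] += 1
--
--         if basket and basket[-1] == doll:  # 동일한 인형이 저장되었을경우
--             basket = basket[:-1]  # 인형 두개는 터뜨려진다
--             answer += 2  # 정답 2개 추가
--         elif doll == 0:  # 인형이 없다면 패스
--             continue
--         else:
--             basket.append(doll)
--     return answer
-- ===== SOURCE B (Python) =====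
-- def solution(board, moves):
--     # Per-column doll stacks (top-first, leading zeros dropped) instead of A's
--     # doll_idx pointer table; equivalence is about the return value only
--     # (A zeroes cells of `board` in place, B leaves `board` untouched).
--     n = len(board[0])
--     cols = []
--     for i in range(n):
--         col = [row[i] for row in board]
--         k = 0
--         while k < len(col) and col[k] == 0:
--             k += 1
--         cols.append(col[k:])
--     answer = 0
--     basket = []
--     for m in moves:
--         c = cols[m - 1]
--         if c:
--             doll = c[0]
--             cols[m - 1] = c[1:]
--         else:
--             doll = 0
--         if basket and basket[-1] == doll:
--             basket.pop()
--             answer += 2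
--         elif doll:
--             basket.append(doll)
--     return answer
-- ===== Notes on version B (the rewrite author's own statement) =====
-- stated objective: simpler
-- what changed: B replaces A's maintained doll_idx pointer table and in-place board zeroing with per-column doll stacks built once (column with leading zeros dropped) that are consumed from the top, leaving the board unmutated.
-- outside the precondition, e.g. on solution([[1, 1], [5]], []): A returns 0, B raises IndexError; on solution([[1], [2, 1]], [0, 0]): A returns 2, B returns 0
import Mathlib
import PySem

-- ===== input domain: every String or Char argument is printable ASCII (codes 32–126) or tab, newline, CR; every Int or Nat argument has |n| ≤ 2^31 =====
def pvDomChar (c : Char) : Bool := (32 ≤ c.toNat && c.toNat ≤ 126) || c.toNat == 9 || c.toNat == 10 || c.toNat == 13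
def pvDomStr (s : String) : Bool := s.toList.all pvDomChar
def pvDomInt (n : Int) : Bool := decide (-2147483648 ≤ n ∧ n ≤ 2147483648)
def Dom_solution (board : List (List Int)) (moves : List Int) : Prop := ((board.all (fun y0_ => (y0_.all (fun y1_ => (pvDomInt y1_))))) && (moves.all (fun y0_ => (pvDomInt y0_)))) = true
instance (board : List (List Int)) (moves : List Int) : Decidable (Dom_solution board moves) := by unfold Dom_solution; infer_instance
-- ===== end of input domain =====

-- B drops A's doll_idx pointer table and in-place board zeroing for per-column doll
-- stacks built once and consumed from the top (objective: simpler). A mutates `board`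
-- in place (zeroes picked cells); B does not — the claim is about the return value only.

-- ===== PORT A =====
-- inner 'for j in range(len(board)): if board[j][i]: doll_idx[i] = j; break' (0 if no hit)
def firstIdxA (board : List (List Int)) (i : Int) : Int :=
  ((PySem.List.pyRange 0 (board.length : Int) 1).find?
      (fun j => PySem.List.pyGetD (PySem.List.pyGetD board j []) i 0 != 0)).getD 0

-- body of 'for m in moves', state (answer, board, doll_idx, basket)
def stepA (st : Int × List (List Int) × List Int × List Int) (m : Int) :
    Int × List (List Int) × List Int × List Int :=
  match st with
  | (answer, board, dollIdx, basket) =>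
    let idx := m - 1
    let di := PySem.List.pyGetD dollIdx idx 0
    let doll := PySem.List.pyGetD (PySem.List.pyGetD board di []) idx 0
    let board' := PySem.List.pySetD board di
        (PySem.List.pySetD (PySem.List.pyGetD board di []) idx 0)
    let dollIdx' := if di + 1 < (board'.length : Int) then
        PySem.List.pySetD dollIdx idx (di + 1) else dollIdx
    if basket ≠ [] ∧ PySem.List.pyGetD basket (-1) 0 = doll then
      (answer + 2, board', dollIdx', PySem.List.slice basket none (some (-1)))
    else if doll = 0 then (answer, board', dollIdx', basket)
    else (answer, board', dollIdx', basket ++ [doll])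

def solution (board : List (List Int)) (moves : List Int) : Int :=
  let dollIdx := (PySem.List.pyRange 0 ((PySem.List.pyGetD board 0 []).length : Int) 1).map
      (fun i => firstIdxA board i)
  (moves.foldl stepA (0, board, dollIdx, [])).1

-- ===== PORT B =====
-- '[row[i] for row in board]' then the k-scan + 'col[k:]' = drop the leading zeros
def colStackB (board : List (List Int)) (i : Int) : List Int :=
  (board.map (fun row => PySem.List.pyGetD row i 0)).dropWhile (fun x => x == 0)

-- body of 'for m in moves', state (answer, cols, basket)
def stepB (st : Int × List (List Int) × List Int) (m : Int) :
    Int × List (List Int) × List Int :=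
  match st with
  | (answer, cols, basket) =>
    match PySem.List.pyGetD cols (m - 1) [] with
    | [] =>
      if basket ≠ [] ∧ PySem.List.pyGetD basket (-1) 0 = (0 : Int) then
        (answer + 2, cols, basket.dropLast)
      else (answer, cols, basket)
    | doll :: rest =>
      let cols' := PySem.List.pySetD cols (m - 1) rest
      if basket ≠ [] ∧ PySem.List.pyGetD basket (-1) 0 = doll then
        (answer + 2, cols', basket.dropLast)
      else if doll = 0 then (answer, cols', basket)
      else (answer, cols', basket ++ [doll])

def solution_alt (board : List (List Int)) (moves : List Int) : Int :=
  let cols := (PySem.List.pyRange 0 ((PySem.List.pyGetD board 0 []).length : Int) 1).map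
      (fun i => colStackB board i)
  (moves.foldl stepB (0, cols, [])).1

-- ===== PRECONDITION & SPEC =====
-- Pre_ excludes the empty board and move numbers outside [1-ncols, ncols] (A raises
-- IndexError there), and non-rectangular boards, on which A may still return a value
-- while its negative-index wraparound per differing row length hits different columns
-- (B builds whole columns and raises, or pulls from the single intended column).
def Pre_solution (board : List (List Int)) (moves : List Int) : Prop :=
  board ≠ [] ∧
  (∀ row ∈ board, row.length = (board.headD []).length) ∧
  (∀ m ∈ moves, 1 - ((board.headD []).length : Int) ≤ m ∧ m ≤ ((board.headD []).length : Int))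
instance (board : List (List Int)) (moves : List Int) : Decidable (Pre_solution board moves) := by
  unfold Pre_solution; infer_instance

def pvWitness_solution : List (List Int) × List Int := ([[0, 3], [1, 2]], [1, 2, 2, 1])

def Spec_solution (board : List (List Int)) (moves : List Int) (out : Int) : Prop := out = solution_alt board moves
instance (board : List (List Int)) (moves : List Int) (out : Int) : Decidable (Spec_solution board moves out) := by unfold Spec_solution; infer_instance

-- ===== CLAIM (what is proved, stated in full; the proofs are below) =====
def Claim_equal_solution : Prop := ∀ (board : List (List Int)) (moves : List Int), Dom_solution board moves → Pre_solution board moves → Spec_solution board moves (solution board moves)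

-- ===== LEMMAS AND PROOFS =====

-- column q of the board, as A's scans see it
def colOf (board : List (List Int)) (q : Nat) : List Int := board.map (fun row => row.getD q 0)

-- the Python index (possibly negative) normalised to a Nat position
def normIdx (n : Nat) (i : Int) : Nat := (if 0 ≤ i then i else i + n).toNat

-- relation between A's per-column pointer and B's per-column stack
def InvCol (c : List Int) (di : Int) (stk : List Int) : Prop :=
  0 ≤ di ∧ di < (c.length : Int) ∧
    (stk = c.drop di.toNat ∨ (stk = [] ∧ ∀ x ∈ c.drop di.toNat, x = 0))

-- full simulation relation between the two loop states
def RelS (bd : List (List Int)) (dollIdx : List Int) (cols : List (List Int)) (h n : Nat) : Prop :=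
  bd.length = h ∧ dollIdx.length = n ∧ cols.length = n ∧
  (∀ row ∈ bd, row.length = n) ∧
  ∀ q, q < n → InvCol (colOf bd q) (dollIdx.getD q 0) (cols.getD q [])

lemma pyIdx?_norm (n : Nat) (i : Int) (h1 : -(n : Int) ≤ i) (h2 : i < (n : Int)) :
    PySem.List.pyIdx? n i = some (normIdx n i) := by
  simp only [PySem.List.pyIdx?, normIdx]
  split_ifs with h3
  · simp_all
  · simp_all; omega

lemma pyGetD_norm {α : Type} (xs : List α) (i : Int) (d : α)
    (h1 : -(xs.length : Int) ≤ i) (h2 : i < (xs.length : Int)) :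
    PySem.List.pyGetD xs i d = xs.getD (normIdx xs.length i) d := by
  simp [PySem.List.pyGetD, PySem.List.pyGet?, pyIdx?_norm _ _ h1 h2, List.getD]

lemma pySetD_norm {α : Type} (xs : List α) (i : Int) (v : α)
    (h1 : -(xs.length : Int) ≤ i) (h2 : i < (xs.length : Int)) :
    PySem.List.pySetD xs i v = xs.set (normIdx xs.length i) v := by
  simp [PySem.List.pySetD, PySem.List.pySet?, pyIdx?_norm _ _ h1 h2]

lemma normIdx_lt (n : Nat) (i : Int) (h1 : -(n : Int) ≤ i) (h2 : i < (n : Int)) :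
    normIdx n i < n := by
  unfold normIdx; split_ifs <;> omega

lemma getD_set_ne {α : Type} (l : List α) (n m : Nat) (a d : α) (hne : n ≠ m) :
    (l.set n a).getD m d = l.getD m d := by
  simp [List.getD, List.getElem?_set_ne hne]

lemma getD_set_self {α : Type} (l : List α) (n : Nat) (a d : α) (h : n < l.length) :
    (l.set n a).getD n d = a := by
  simp [List.getD, h]

lemma find?_map' {α β : Type} (p : β → Bool) (f : α → β) (l : List α) :
    (l.map f).find? p = (l.find? (fun k => p (f k))).map f := by
  induction l with
  | nil => rfl
  | cons x xs ih => simp [List.find?]; split <;> simp_all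

lemma find?_congr_mem {α : Type} (p q : α → Bool) (l : List α)
    (h : ∀ x ∈ l, p x = q x) : l.find? p = l.find? q := by
  induction l with
  | nil => rfl
  | cons x xs ih =>
    have hx := h x (by simp)
    simp only [List.find?, hx]
    split
    · rfl
    · exact ih (fun y hy => h y (by simp [hy]))

lemma find?_range_spec (p : Nat → Bool) (n : Nat) :
    (∃ j, (List.range n).find? p = some j ∧ j < n ∧ p j = true ∧ ∀ k < j, p k = false) ∨
    ((List.range n).find? p = none ∧ ∀ k < n, p k = false) := by
  induction n with
  | zero => right; simp
  | succ n ih =>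
    rw [List.range_succ, List.find?_append]
    rcases ih with ⟨j, hj, hlt, hp, hfst⟩ | ⟨hn, hall⟩
    · left; exact ⟨j, by simp [hj], by omega, hp, hfst⟩
    · rw [hn]
      by_cases hpn : p n = true
      · left
        refine ⟨n, by simp [List.find?, hpn], by omega, hpn, hall⟩
      · right
        constructor
        · simp [List.find?]; simp_all
        · intro k hk
          rcases Nat.lt_succ_iff_lt_or_eq.mp hk with h | h
          · exact hall k h
          · subst h; simp_all
    
lemma dropWhile_zero_eq_drop (c : List Int) (j : Nat) (hj : j < c.length)
    (hz : ∀ k, k < j → c.getD k 0 = 0) (hnz : c.getD j 0 ≠ 0) :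
    c.dropWhile (fun x => x == 0) = c.drop j := by
  induction c generalizing j with
  | nil => simp at hj
  | cons x xs ih =>
    cases j with
    | zero =>
      simp only [List.getD_cons_zero] at hnz
      simp only [List.dropWhile_cons]
      have : (x == 0) = false := by simpa using hnz
      simp [this]
    | succ j =>
      have hx : x = 0 := hz 0 (by omega)
      subst hx
      simp only [List.dropWhile_cons, BEq.rfl, List.drop_succ_cons]
      exact ih j (by simpa using hj) (fun k hk => hz (k+1) (by omega)) (by simpa using hnz)

lemma drop_cons_getD (c : List Int) (t : Nat) (h : t < c.length) :
    c.drop t = c.getD t 0 :: c.drop (t + 1) := by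
  rw [List.drop_eq_getElem_cons h, List.getD_eq_getElem _ _ h]

lemma colOf_length (bd : List (List Int)) (q : Nat) : (colOf bd q).length = bd.length := by
  simp [colOf]

lemma colOf_getD (bd : List (List Int)) (q t : Nat) (h : t < bd.length) :
    (colOf bd q).getD t 0 = (bd.getD t []).getD q 0 := by
  simp [colOf, List.getD, List.getElem?_map, List.getElem?_eq_getElem h]

lemma getD_map_pyRange' {α : Type} (f : Int → α) (n q : Nat) (d : α) (hq : q < n) :
    ((PySem.List.pyRange 0 (n : Int) 1).map f).getD q d = f (q : Int) := by
  rw [PySem.List.pyRange_zero_nat, List.map_map]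
  exact PySem.List.getD_map_range _ n q d hq

lemma colOf_set (bd : List (List Int)) (q : Nat) (t : Nat) (row' : List Int) :
    colOf (bd.set t row') q = (colOf bd q).set t (row'.getD q 0) := by
  simp [colOf, List.map_set]

-- the shared basket/answer update, once the popped doll is known
def basketStep (ans : Int) (basket : List Int) (doll : Int) : Int × List Int :=
  if basket ≠ [] ∧ PySem.List.pyGetD basket (-1) 0 = doll then (ans + 2, basket.dropLast)
  else if doll = 0 then (ans, basket)
  else (ans, basket ++ [doll])

lemma normIdx_nonneg (n : Nat) (i : Int) (h : 0 ≤ i) : normIdx n i = i.toNat := by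
  simp [normIdx, h]

lemma stepA_eq (m ans : Int) (bd : List (List Int)) (dollIdx basket : List Int) (n : Nat)
    (hdl : dollIdx.length = n)
    (hm1 : -(n : Int) ≤ m - 1) (hm2 : m - 1 < (n : Int))
    (hrect : ∀ row ∈ bd, row.length = n)
    (hdi0 : 0 ≤ dollIdx.getD (normIdx n (m - 1)) 0)
    (hdih : dollIdx.getD (normIdx n (m - 1)) 0 < (bd.length : Int)) :
    stepA (ans, bd, dollIdx, basket) m =
      ((basketStep ans basket ((colOf bd (normIdx n (m - 1))).getD
          (dollIdx.getD (normIdx n (m - 1)) 0).toNat 0)).1,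
       bd.set (dollIdx.getD (normIdx n (m - 1)) 0).toNat
         ((bd.getD (dollIdx.getD (normIdx n (m - 1)) 0).toNat []).set (normIdx n (m - 1)) 0),
       (if dollIdx.getD (normIdx n (m - 1)) 0 + 1 < (bd.length : Int) then
          dollIdx.set (normIdx n (m - 1)) (dollIdx.getD (normIdx n (m - 1)) 0 + 1)
        else dollIdx),
       (basketStep ans basket ((colOf bd (normIdx n (m - 1))).getD
          (dollIdx.getD (normIdx n (m - 1)) 0).toNat 0)).2) := by
  set q := normIdx n (m - 1) with hqdef
  set di := dollIdx.getD q 0 with hdidef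
  set t := di.toNat with htdef
  have ht : t < bd.length := by omega
  have hrow : bd.getD t [] ∈ bd := by
    rw [List.getD_eq_getElem _ _ ht]; exact List.getElem_mem ht
  have hrlen : (bd.getD t []).length = n := hrect _ hrow
  have e1 : PySem.List.pyGetD dollIdx (m - 1) 0 = di := by
    rw [pyGetD_norm dollIdx (m - 1) 0 (by omega) (by omega), hdl]
  have e2 : PySem.List.pyGetD bd di [] = bd.getD t [] := by
    rw [pyGetD_norm bd di [] (by omega) (by omega), normIdx_nonneg _ _ hdi0]
  have e3 : PySem.List.pyGetD (bd.getD t []) (m - 1) 0 = (colOf bd q).getD t 0 := by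
    rw [pyGetD_norm _ (m - 1) 0 (by omega) (by omega), hrlen, colOf_getD bd q t ht]
  have e4 : PySem.List.pySetD (bd.getD t []) (m - 1) 0 = (bd.getD t []).set q 0 := by
    rw [pySetD_norm _ (m - 1) 0 (by omega) (by omega), hrlen]
  have e5 : PySem.List.pySetD bd di ((bd.getD t []).set q 0)
      = bd.set t ((bd.getD t []).set q 0) := by
    rw [pySetD_norm bd di _ (by omega) (by omega), normIdx_nonneg _ _ hdi0]
  have e6 : PySem.List.pySetD dollIdx (m - 1) (di + 1) = dollIdx.set q (di + 1) := by
    rw [pySetD_norm dollIdx (m - 1) _ (by omega) (by omega), hdl]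
  simp only [stepA, e1, e2, e3, e4, e5, e6, basketStep, List.length_set,
    PySem.List.slice_to_neg_one]
  split_ifs <;> rfl

lemma stepB_eq_cons (m ans : Int) (cols : List (List Int)) (basket : List Int) (n : Nat)
    (d : Int) (rest : List Int) (hcl : cols.length = n)
    (hm1 : -(n : Int) ≤ m - 1) (hm2 : m - 1 < (n : Int))
    (hstk : cols.getD (normIdx n (m - 1)) [] = d :: rest) :
    stepB (ans, cols, basket) m =
      ((basketStep ans basket d).1, cols.set (normIdx n (m - 1)) rest,
       (basketStep ans basket d).2) := by
  have e1 : PySem.List.pyGetD cols (m - 1) [] = d :: rest := by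
    rw [pyGetD_norm cols (m - 1) [] (by omega) (by omega), hcl, hstk]
  have e2 : PySem.List.pySetD cols (m - 1) rest = cols.set (normIdx n (m - 1)) rest := by
    rw [pySetD_norm cols (m - 1) rest (by omega) (by omega), hcl]
  simp only [stepB, e1, e2, basketStep]
  split_ifs <;> rfl

lemma stepB_eq_nil (m ans : Int) (cols : List (List Int)) (basket : List Int) (n : Nat)
    (hcl : cols.length = n)
    (hm1 : -(n : Int) ≤ m - 1) (hm2 : m - 1 < (n : Int))
    (hstk : cols.getD (normIdx n (m - 1)) [] = []) :
    stepB (ans, cols, basket) m =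
      ((basketStep ans basket 0).1, cols, (basketStep ans basket 0).2) := by
  have e1 : PySem.List.pyGetD cols (m - 1) [] = [] := by
    rw [pyGetD_norm cols (m - 1) [] (by omega) (by omega), hcl, hstk]
  simp only [stepB, e1, basketStep]
  split_ifs <;> simp_all

lemma step_sim (h n : Nat) (m ans : Int) (bd : List (List Int)) (dollIdx basket : List Int)
    (cols : List (List Int)) (hrel : RelS bd dollIdx cols h n)
    (hm1 : 1 - (n : Int) ≤ m) (hm2 : m ≤ (n : Int)) :
    (stepA (ans, bd, dollIdx, basket) m).1 = (stepB (ans, cols, basket) m).1 ∧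
    (stepA (ans, bd, dollIdx, basket) m).2.2.2 = (stepB (ans, cols, basket) m).2.2 ∧
    RelS (stepA (ans, bd, dollIdx, basket) m).2.1 (stepA (ans, bd, dollIdx, basket) m).2.2.1
      (stepB (ans, cols, basket) m).2.1 h n := by
  obtain ⟨hbl, hdl, hcl, hrect, hinv⟩ := hrel
  have hn : 0 < n := by omega
  have hqb1 : -(n : Int) ≤ m - 1 := by omega
  have hqb2 : m - 1 < (n : Int) := by omega
  set q := normIdx n (m - 1) with hqdef
  have hq : q < n := normIdx_lt n (m - 1) hqb1 hqb2
  obtain ⟨hdi0, hdih, hcase⟩ := hinv q hq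
  set di := dollIdx.getD q 0 with hdidef
  set t := di.toNat with htdef
  set c := colOf bd q with hcdef
  have hclen : c.length = bd.length := colOf_length bd q
  have ht : t < bd.length := by omega
  have hrow : bd.getD t [] ∈ bd := by
    rw [List.getD_eq_getElem _ _ ht]; exact List.getElem_mem ht
  have hrlen : (bd.getD t []).length = n := hrect _ hrow
  have hA := stepA_eq m ans bd dollIdx basket n hdl hqb1 hqb2 hrect
    (by rw [← hqdef, ← hdidef]; exact hdi0) (by rw [← hqdef, ← hdidef]; omega)
  rw [← hqdef, ← hdidef, ← htdef, ← hcdef] at hA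
  have hdrop : c.drop t = c.getD t 0 :: c.drop (t + 1) := drop_cons_getD c t (by omega)
  -- untouched columns keep their invariant
  have hother : ∀ q', q' < n → q' ≠ q →
      colOf (bd.set t ((bd.getD t []).set q 0)) q' = colOf bd q' := by
    intro q' hq' hne
    rw [colOf_set, getD_set_ne _ _ _ _ _ (fun hE => hne hE.symm)]
    have ht' : t < (colOf bd q').length := by rw [colOf_length]; omega
    rw [← colOf_getD bd q' t (by omega), List.getD_eq_getElem _ _ ht',
      List.set_getElem_self]
  have hdoll_other : ∀ q', q' ≠ q →
      (if di + 1 < (bd.length : Int) then dollIdx.set q (di + 1) else dollIdx).getD q' 0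
        = dollIdx.getD q' 0 := by
    intro q' hne
    split_ifs with hcap
    · exact getD_set_ne _ _ _ _ _ (fun hE => hne hE.symm)
    · rfl
  have hrect' : ∀ row ∈ bd.set t ((bd.getD t []).set q 0), row.length = n := by
    intro row hrowmem
    rcases List.mem_or_eq_of_mem_set hrowmem with hmem | heq
    · exact hrect _ hmem
    · rw [heq, List.length_set]; exact hrlen
  have hcq' : colOf (bd.set t ((bd.getD t []).set q 0)) q = c.set t 0 := by
    rw [colOf_set, getD_set_self _ _ _ _ (by omega)]
  have hdropset : ∀ u, t < u → (c.set t 0).drop u = c.drop u := by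
    intro u hu
    rw [List.drop_set, if_pos hu]
  rcases hcase with hstk | ⟨hstk, hz⟩
  · -- A pulls the top of B's stack
    have hB := stepB_eq_cons m ans cols basket n (c.getD t 0) (c.drop (t + 1)) hcl hqb1 hqb2
      (by show cols.getD q [] = c.getD t 0 :: c.drop (t + 1); rw [hstk, hdrop])
    rw [← hqdef] at hB
    rw [hA, hB]
    refine ⟨rfl, rfl, by simp [hbl], by split_ifs <;> simp [hdl], by simp [hcl], hrect', ?_⟩
    intro q' hq'
    by_cases hqq : q' = q
    · subst hqq
      rw [hcq', getD_set_self _ _ _ _ (by omega)]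
      by_cases hcap : di + 1 < (bd.length : Int)
      · rw [if_pos hcap, getD_set_self _ _ _ _ (by omega)]
        refine ⟨by omega, by simp [List.length_set]; omega, Or.inl ?_⟩
        have htn : (di + 1).toNat = t + 1 := by omega
        rw [htn, hdropset (t + 1) (by omega)]
      · rw [if_neg hcap]
        refine ⟨hdi0, by rw [List.length_set]; rw [hclen] at hdih ⊢; omega, Or.inr ⟨?_, ?_⟩⟩
        · exact List.drop_eq_nil_of_le (by omega)
        · rw [drop_cons_getD (c.set t 0) t (by rw [List.length_set]; omega),
            getD_set_self _ _ _ _ (by omega), hdropset (t + 1) (by omega),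
            List.drop_eq_nil_of_le (by omega)]
          simp
    · rw [hother q' hq' hqq, hdoll_other q' hqq,
        getD_set_ne _ _ _ _ _ (fun hE => hqq hE.symm)]
      exact hinv q' hq'
  · -- B's stack for this column is empty: A pulls a zero
    have hd0 : c.getD t 0 = 0 := hz _ (by rw [hdrop]; exact List.mem_cons_self)
    have hB := stepB_eq_nil m ans cols basket n hcl hqb1 hqb2
      (by show cols.getD q [] = []; exact hstk)
    rw [hA, hB, hd0]
    refine ⟨rfl, rfl, by simp [hbl], by split_ifs <;> simp [hdl], hcl, hrect', ?_⟩
    intro q' hq'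
    by_cases hqq : q' = q
    · subst hqq
      rw [hcq']
      have hz' : ∀ x ∈ (c.set t 0).drop t, x = 0 := by
        intro x hx
        rw [drop_cons_getD (c.set t 0) t (by rw [List.length_set]; omega),
          getD_set_self _ _ _ _ (by omega),
          hdropset (t + 1) (by omega)] at hx
        rcases List.mem_cons.mp hx with hE | hE
        · exact hE
        · exact hz x (by rw [hdrop]; exact List.mem_cons_of_mem _ hE)
      by_cases hcap : di + 1 < (bd.length : Int)
      · rw [if_pos hcap, getD_set_self _ _ _ _ (by omega)]
        refine ⟨by omega, by simp [List.length_set]; omega, Or.inr ⟨hstk, ?_⟩⟩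
        intro x hx
        have htn : (di + 1).toNat = t + 1 := by omega
        rw [htn, hdropset (t + 1) (by omega)] at hx
        exact hz x (by rw [hdrop]; exact List.mem_cons_of_mem _ hx)
      · rw [if_neg hcap]
        exact ⟨hdi0, by rw [List.length_set]; rw [hclen] at hdih ⊢; omega,
          Or.inr ⟨hstk, hz'⟩⟩
    · rw [hother q' hq' hqq, hdoll_other q' hqq]
      exact hinv q' hq'

lemma foldl_sim (moves : List Int) (h n : Nat) (ans : Int) (bd : List (List Int))
    (dollIdx basket : List Int) (cols : List (List Int))
    (hrel : RelS bd dollIdx cols h n)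
    (hb : ∀ m ∈ moves, 1 - (n : Int) ≤ m ∧ m ≤ (n : Int)) :
    (moves.foldl stepA (ans, bd, dollIdx, basket)).1
      = (moves.foldl stepB (ans, cols, basket)).1 := by
  induction moves generalizing ans bd dollIdx basket cols with
  | nil => rfl
  | cons m ms ih =>
    have hm := hb m (by simp)
    obtain ⟨e1, e2, hrel2⟩ := step_sim h n m ans bd dollIdx basket cols hrel hm.1 hm.2
    simp only [List.foldl_cons]
    rcases hA : stepA (ans, bd, dollIdx, basket) m with ⟨a1, bd1, d1, k1⟩
    rcases hB : stepB (ans, cols, basket) m with ⟨a2, c2, k2⟩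
    rw [hA, hB] at e1 e2 hrel2
    simp only at e1 e2 hrel2
    subst e1; subst e2
    exact ih a1 bd1 d1 k1 c2 hrel2 (fun x hx => hb x (by simp [hx]))

lemma init_rel (bd : List (List Int)) (n : Nat) (hne : bd ≠ [])
    (hrect : ∀ row ∈ bd, row.length = n) :
    RelS bd ((PySem.List.pyRange 0 (n : Int) 1).map (fun i => firstIdxA bd i))
      ((PySem.List.pyRange 0 (n : Int) 1).map (fun i => colStackB bd i)) bd.length n := by
  have hpos : 0 < bd.length := List.length_pos_iff.mpr hne
  refine ⟨rfl, by rw [PySem.List.pyRange_zero_nat]; simp,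
    by rw [PySem.List.pyRange_zero_nat]; simp, hrect, ?_⟩
  intro q hq
  rw [getD_map_pyRange' (fun i => firstIdxA bd i) n q 0 hq,
      getD_map_pyRange' (fun i => colStackB bd i) n q [] hq]
  have hlen : (colOf bd q).length = bd.length := colOf_length bd q
  have hcs : colStackB bd (q : Int) = (colOf bd q).dropWhile (fun x => x == 0) := by
    simp [colStackB, colOf]
  have hfi : firstIdxA bd (q : Int)
      = (((List.range bd.length).find? (fun k => (colOf bd q).getD k 0 != 0)).map
          (fun k : Nat => (k : Int))).getD 0 := by
    unfold firstIdxA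
    rw [PySem.List.pyRange_zero_nat, find?_map',
        find?_congr_mem _ (fun k => (colOf bd q).getD k 0 != 0) _ ?_]
    intro k hk
    have hk' : k < bd.length := List.mem_range.mp hk
    simp [colOf, List.getElem?_eq_getElem hk']
  rcases find?_range_spec (fun k => (colOf bd q).getD k 0 != 0) bd.length with
    ⟨j, hj, hlt, hp, hfst⟩ | ⟨hn, hall⟩
  · refine ⟨by rw [hfi, hj]; simp, by rw [hfi, hj]; simpa [hlen] using hlt, Or.inl ?_⟩
    rw [hfi, hj, hcs]
    simp only [Option.map_some, Option.getD_some, Int.toNat_natCast]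
    exact dropWhile_zero_eq_drop _ j (hlen ▸ hlt)
      (fun k hk => by simpa using hfst k hk) (by simpa using hp)
  · refine ⟨by rw [hfi, hn]; simp, by rw [hfi, hn]; simpa [hlen] using hpos, Or.inr ?_⟩
    have hzero : ∀ x ∈ colOf bd q, x = 0 := by
      intro x hx
      obtain ⟨idx, hidx, hx⟩ := List.mem_iff_getElem.mp hx
      have h0 := hall idx (hlen ▸ hidx)
      rw [List.getD_eq_getElem _ _ hidx] at h0
      simp at h0
      rw [← hx]; exact h0
    refine ⟨?_, ?_⟩
    · rw [hcs]
      exact List.dropWhile_eq_nil_iff.mpr (fun x hx => by simpa using hzero x hx)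
    · rw [hfi, hn]
      intro x hx
      exact hzero x (List.mem_of_mem_drop hx)

-- ===== VERDICT (by name: the statement is the Claim_ definition above) =====
theorem solution_spec : Claim_equal_solution := by
  intro board moves _hdom hpre
  obtain ⟨hne, hrect, hmv⟩ := hpre
  show solution board moves = solution_alt board moves
  cases board with
  | nil => exact absurd rfl hne
  | cons r rest =>
    simp only [solution, solution_alt]
    have hh : PySem.List.pyGetD (r :: rest) 0 [] = r := by
      simp [PySem.List.pyGetD_zero]
    rw [hh]
    have hrect' : ∀ row ∈ r :: rest, row.length = r.length := by simpa using hrect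
    have hmv' : ∀ m ∈ moves, 1 - (r.length : Int) ≤ m ∧ m ≤ (r.length : Int) := by
      simpa using hmv
    exact foldl_sim moves (r :: rest).length r.length 0 (r :: rest) _ [] _
      (init_rel (r :: rest) r.length (by simp) hrect') hmv'
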